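-- pv_equiv track=rewrite | github.com/BrianChang55/vector-sandbox | vector_app/action_classification/tool_matcher.py | _resolve_target_to_connectors
-- ===== SOURCE A (Python) =====
-- from typing import Any, Dict, List, Optional
--
-- def _resolve_target_to_connectors(
--
--     target: str,
--     connected_connectors: List[str],
-- ) -> List[str]:
--     """
--     Resolve an action target to matching connected connector(s).
--
--     Uses fuzzy matching to find connectors that match the target.
--     Returns empty list if target is 'unknown' or doesn't match any connector.
--
--     Args:
--         target: The target from action classification (e.g., 'github', 'Slack', 'unknown')
--         connected_connectors: List of connected connector IDs
--
--     Returns: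
--         List of matching connector IDs (usually 1, but could be multiple for ambiguous targets)
--     """
--     if not target or target.lower() in ('unknown', 'external data', 'external api'): # TODO: handle the structured output so we can do ez validation
--         return []
--
--     target_lower = target.lower()
--     matched = []
--
--     for connector_id in connected_connectors:
--         connector_lower = connector_id.lower()
--
--         # Exact match
--         if target_lower == connector_lower:
--             return [connector_id]  # Exact match, return immediately
--
--         # Partial match (target is substring of connector or vice versa)
--         if target_lower in connector_lower or connector_lower in target_lower:
--             matched.append(connector_id)
--
--     return matched
-- ===== SOURCE B (Python) =====
-- def _resolve_target_to_connectors(target, connected_connectors):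
--     # Two passes: an exact-match scan that returns immediately, then a
--     # substring-filter fallback; A fuses both into one loop with an
--     # accumulator that is abandoned on an exact match.
--     if not target or target.lower() in ('unknown', 'external data', 'external api'):
--         return []
--     target_lower = target.lower()
--     for connector_id in connected_connectors:
--         if connector_id.lower() == target_lower:
--             return [connector_id]
--     return [c for c in connected_connectors
--             if target_lower in c.lower() or c.lower() in target_lower]
-- ===== Notes on version B (the rewrite author's own statement) =====
-- stated objective: simpler
-- what changed: Replaces A's single fused loop (which keeps an accumulator of partial matches that it abandons on an exact hit) by two separate passes: a first scan that returns the first exact match immediately, then a plain filter comprehension for substring matches; no accumulator state is threaded.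
import Mathlib
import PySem

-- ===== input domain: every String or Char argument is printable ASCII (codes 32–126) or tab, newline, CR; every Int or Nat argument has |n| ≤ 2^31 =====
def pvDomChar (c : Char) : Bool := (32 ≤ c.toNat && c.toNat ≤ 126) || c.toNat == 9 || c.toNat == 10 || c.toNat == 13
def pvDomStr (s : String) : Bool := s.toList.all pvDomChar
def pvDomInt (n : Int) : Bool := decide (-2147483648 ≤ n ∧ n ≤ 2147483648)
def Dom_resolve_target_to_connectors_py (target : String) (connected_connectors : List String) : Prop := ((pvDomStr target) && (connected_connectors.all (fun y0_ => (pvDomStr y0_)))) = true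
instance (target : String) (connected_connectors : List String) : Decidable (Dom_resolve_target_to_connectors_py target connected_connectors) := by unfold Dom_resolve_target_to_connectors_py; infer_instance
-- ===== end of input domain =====

-- B separates A's fused loop into an exact-match scan then a substring filter (objective: simpler).

-- ===== PORT A =====
-- the for-loop with early return and the 'matched' accumulator
def resolveLoopA (target_lower : String) : List String → List String → List String
  | [], matched => matched
  | connector_id :: rest, matched =>
      let connector_lower := PySem.Str.lower connector_id
      if target_lower == connector_lower then [connector_id]
      else if PySem.Str.isIn target_lower connector_lower || PySem.Str.isIn connector_lower target_lower then
        resolveLoopA target_lower rest (matched ++ [connector_id])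
      else
        resolveLoopA target_lower rest matched

def resolve_target_to_connectors_py (target : String) (connected_connectors : List String) : List String :=
  if target == "" || (PySem.Str.lower target == "unknown" || PySem.Str.lower target == "external data" || PySem.Str.lower target == "external api") then
    []
  else
    let target_lower := PySem.Str.lower target
    resolveLoopA target_lower connected_connectors []

-- ===== PORT B =====
-- first pass: first exact match, returned immediately
def firstExactB (target_lower : String) : List String → Option String
  | [] => none
  | connector_id :: rest =>
      if PySem.Str.lower connector_id == target_lower then some connector_id
      else firstExactB target_lower rest

def resolve_target_to_connectors_py_alt (target : String) (connected_connectors : List String) : List String :=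
  if target == "" || (PySem.Str.lower target == "unknown" || PySem.Str.lower target == "external data" || PySem.Str.lower target == "external api") then
    []
  else
    let target_lower := PySem.Str.lower target
    match firstExactB target_lower connected_connectors with
    | some c => [c]
    | none =>
        connected_connectors.filter (fun c =>
          PySem.Str.isIn target_lower (PySem.Str.lower c) || PySem.Str.isIn (PySem.Str.lower c) target_lower)

-- ===== PRECONDITION & SPEC =====
def Spec_resolve_target_to_connectors_py (target : String) (connected_connectors : List String) (out : List String) : Prop := out = resolve_target_to_connectors_py_alt target connected_connectors
instance (target : String) (connected_connectors : List String) (out : List String) : Decidable (Spec_resolve_target_to_connectors_py target connected_connectors out) := by unfold Spec_resolve_target_to_connectors_py; infer_instance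

-- ===== CLAIM (what is proved, stated in full; the proofs are below) =====
def Claim_equal_resolve_target_to_connectors_py : Prop := ∀ (target : String) (connected_connectors : List String), Dom_resolve_target_to_connectors_py target connected_connectors → Spec_resolve_target_to_connectors_py target connected_connectors (resolve_target_to_connectors_py target connected_connectors)

-- ===== LEMMAS AND PROOFS =====
-- the fused loop equals: first exact match if any, else acc ++ the substring filter
theorem resolveLoopA_eq (tl : String) (cs acc : List String) :
    resolveLoopA tl cs acc =
      match firstExactB tl cs with
      | some c => [c]
      | none => acc ++ cs.filter (fun c =>
          PySem.Str.isIn tl (PySem.Str.lower c) || PySem.Str.isIn (PySem.Str.lower c) tl) := by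
  induction cs generalizing acc with
  | nil => simp [resolveLoopA, firstExactB]
  | cons c rest ih =>
    simp only [resolveLoopA, firstExactB]
    by_cases h : tl = PySem.Str.lower c
    · simp [h]
    · have h' : ¬ PySem.Str.lower c = tl := fun e => h e.symm
      simp only [beq_iff_eq, h, h', if_false]
      by_cases hp : (PySem.Str.isIn tl (PySem.Str.lower c) || PySem.Str.isIn (PySem.Str.lower c) tl) = true
      all_goals simp [PySem.Str.isIn] at hp
      · simp [hp, ih]
      · simp [ih, hp]

-- ===== VERDICT (by name: the statement is the Claim_ definition above) =====
theorem resolve_target_to_connectors_py_spec : Claim_equal_resolve_target_to_connectors_py := by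
  intro target cs _
  unfold Spec_resolve_target_to_connectors_py resolve_target_to_connectors_py resolve_target_to_connectors_py_alt
  split
  · rfl
  · simp only [resolveLoopA_eq]
    cases firstExactB (PySem.Str.lower target) cs <;> simp
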